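-- pv_equiv track=rewrite | github.com/matthiebl/aoc | 2023/05.py | clean_up_list
-- ===== SOURCE A (Python) =====
-- def missing_region(l: list[tuple[int, int, int]]) -> bool:
--     _, lend, _ = l[0]
--     for start, end, _ in l[1:]:
--         if lend != start:
--             return True
--         lend = end
--     return False
--
-- def clean_up_list(l: list[tuple[int, int, int]]):
--     if l[0][0] != 0:
--         l.insert(0, (0, l[0][0], 0))
--
--     while missing_region(l):
--         _, lend, _ = l[0]
--         for i, (start, end, _) in enumerate(l[1:]):
--             if lend != start:
--                 l.insert(i + 1, (lend, start, 0))
--                 break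
--             lend = end
--     return l
-- ===== SOURCE B (Python) =====
-- def clean_up_list(l: list[tuple[int, int, int]]):
--     out = []
--     prev = 0
--     for start, end, val in l:
--         if start != prev:
--             out.append((prev, start, 0))
--         out.append((start, end, val))
--         prev = end
--     l[:] = out
--     return l
-- ===== Notes on version B (the rewrite author's own statement) =====
-- stated objective: faster
-- what changed: Replace the while-loop that rescans the list from the front after each single gap insertion with one left-to-right pass that emits a filler tuple before every element whose start differs from the previous end.
import Mathlib
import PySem

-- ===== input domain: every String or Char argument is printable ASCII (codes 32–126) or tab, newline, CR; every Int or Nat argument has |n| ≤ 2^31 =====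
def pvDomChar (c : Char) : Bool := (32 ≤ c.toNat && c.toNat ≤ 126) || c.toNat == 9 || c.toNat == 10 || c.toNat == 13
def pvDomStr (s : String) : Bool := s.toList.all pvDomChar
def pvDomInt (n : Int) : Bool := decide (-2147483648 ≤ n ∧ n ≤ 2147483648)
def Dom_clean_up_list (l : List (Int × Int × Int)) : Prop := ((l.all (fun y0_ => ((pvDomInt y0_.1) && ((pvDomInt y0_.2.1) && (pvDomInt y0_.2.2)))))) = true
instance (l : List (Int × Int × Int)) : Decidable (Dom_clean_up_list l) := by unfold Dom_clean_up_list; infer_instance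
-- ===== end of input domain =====

-- B replaces A's quadratic rescan-and-insert while-loop by a single left-to-right
-- gap-filling pass (measured asymptotically faster). Both A and B mutate the argument
-- list in place in Python; the equivalence proved here is about the return value.

-- ===== PORT A =====
-- missing_region's for-loop over l[1:] with running lend (A calls it only with l ≠ []).
def pvMissingAux (lend : Int) : List (Int × Int × Int) → Bool
  | [] => false
  | (s, e, _) :: t => if lend ≠ s then true else pvMissingAux e t

-- missing_region; the [] case is unreachable from clean_up_list (A raises on [] before).
def missing_region (l : List (Int × Int × Int)) : Bool :=
  match l with
  | [] => false
  | (_, lend, _) :: t => pvMissingAux lend t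

-- the body of the while loop: 'for i,(start,end,_) in enumerate(l[1:]): … insert(i+1,…); break'
def pvFillFirst (lend : Int) : List (Int × Int × Int) → List (Int × Int × Int)
  | [] => []
  | (s, e, x) :: t =>
      if lend ≠ s then (lend, s, 0) :: (s, e, x) :: t
      else (s, e, x) :: pvFillFirst e t

-- the while loop, fuel-bounded (fuel l.length is proved sufficient below)
def pvWhileFill (fuel : Nat) (l : List (Int × Int × Int)) : List (Int × Int × Int) :=
  match fuel with
  | 0 => l
  | fuel + 1 =>
      if missing_region l then
        match l with
        | [] => []
        | (a, b, c) :: t => pvWhileFill fuel ((a, b, c) :: pvFillFirst b t)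
      else l

def clean_up_list (l : List (Int × Int × Int)) : List (Int × Int × Int) :=
  match l with
  | [] => []  -- A raises IndexError here; excluded by Pre_clean_up_list
  | (s, e, x) :: t =>
      let l' := if s ≠ 0 then (0, s, 0) :: (s, e, x) :: t else (s, e, x) :: t
      pvWhileFill l'.length l'

-- ===== PORT B =====
-- B's single pass: emit a filler before each element whose start differs from prev end.
def pvFillAll (prev : Int) : List (Int × Int × Int) → List (Int × Int × Int)
  | [] => []
  | (s, e, x) :: t =>
      if s ≠ prev then (prev, s, 0) :: (s, e, x) :: pvFillAll e t
      else (s, e, x) :: pvFillAll e t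

def clean_up_list_alt (l : List (Int × Int × Int)) : List (Int × Int × Int) :=
  pvFillAll 0 l

-- ===== PRECONDITION & SPEC =====
-- Pre_ excludes exactly the empty list, on which A raises IndexError at l[0].
def Pre_clean_up_list (l : List (Int × Int × Int)) : Prop := l ≠ []
instance (l : List (Int × Int × Int)) : Decidable (Pre_clean_up_list l) := by
  unfold Pre_clean_up_list; infer_instance

def pvWitness_clean_up_list : (List (Int × Int × Int)) := [(2, 5, 7), (9, 12, 3)]

def Spec_clean_up_list (l : List (Int × Int × Int)) (out : List (Int × Int × Int)) : Prop := out = clean_up_list_alt l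
instance (l : List (Int × Int × Int)) (out : List (Int × Int × Int)) : Decidable (Spec_clean_up_list l out) := by unfold Spec_clean_up_list; infer_instance

-- ===== CLAIM (what is proved, stated in full; the proofs are below) =====
def Claim_equal_clean_up_list : Prop := ∀ (l : List (Int × Int × Int)), Dom_clean_up_list l → Pre_clean_up_list l → Spec_clean_up_list l (clean_up_list l)
-- ===== LEMMAS AND PROOFS =====

-- number of adjacent gaps, the termination measure of A's while loop
def pvGaps (lend : Int) : List (Int × Int × Int) → Nat
  | [] => 0
  | (s, e, _) :: t => (if lend ≠ s then 1 else 0) + pvGaps e t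

theorem pvMissingAux_eq_gaps (t : List (Int × Int × Int)) : ∀ lend,
    pvMissingAux lend t = decide (pvGaps lend t ≠ 0) := by
  induction t with
  | nil => intro lend; simp [pvMissingAux, pvGaps]
  | cons h t ih =>
      intro lend
      obtain ⟨s, e, x⟩ := h
      by_cases hls : lend ≠ s <;> simp [pvMissingAux, pvGaps, hls, ih]

theorem pvFillAll_of_no_gap (t : List (Int × Int × Int)) : ∀ lend,
    pvGaps lend t = 0 → pvFillAll lend t = t := by
  induction t with
  | nil => intro lend _; rfl
  | cons h t ih =>
      intro lend hg
      obtain ⟨s, e, x⟩ := h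
      by_cases hls : lend ≠ s
      · simp [pvGaps, hls] at hg
      · push_neg at hls
        simp [pvGaps, hls] at hg
        simp [pvFillAll, hls, ih e hg]

theorem pvFillAll_fillFirst (t : List (Int × Int × Int)) : ∀ lend,
    pvFillAll lend (pvFillFirst lend t) = pvFillAll lend t := by
  induction t with
  | nil => intro lend; rfl
  | cons h t ih =>
      intro lend
      obtain ⟨s, e, x⟩ := h
      by_cases hls : lend ≠ s
      · simp [pvFillFirst, pvFillAll, hls, Ne.symm hls]
      · push_neg at hls
        subst hls
        simp [pvFillFirst, pvFillAll, ih]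

theorem pvGaps_fillFirst (t : List (Int × Int × Int)) : ∀ lend,
    pvGaps lend t ≠ 0 → pvGaps lend (pvFillFirst lend t) = pvGaps lend t - 1 := by
  induction t with
  | nil => intro lend h; simp [pvGaps] at h
  | cons h t ih =>
      intro lend hg
      obtain ⟨s, e, x⟩ := h
      by_cases hls : lend ≠ s
      · simp [pvFillFirst, pvGaps, hls]
      · push_neg at hls
        simp [pvGaps, hls] at hg
        simp [pvFillFirst, pvGaps, hls, ih e hg]

theorem pvWhileFill_eq_fillAll (fuel : Nat) :
    ∀ (a b c : Int) (t : List (Int × Int × Int)), pvGaps b t ≤ fuel →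
    pvWhileFill fuel ((a, b, c) :: t) = (a, b, c) :: pvFillAll b t := by
  induction fuel with
  | zero =>
      intro a b c t hf
      have hg : pvGaps b t = 0 := Nat.le_zero.mp hf
      simp [pvWhileFill, pvFillAll_of_no_gap t b hg]
  | succ f ih =>
      intro a b c t hf
      by_cases hg : pvGaps b t = 0
      · have hm : missing_region ((a, b, c) :: t) = false := by
          simp [missing_region, pvMissingAux_eq_gaps, hg]
        simp [pvWhileFill, hm, pvFillAll_of_no_gap t b hg]
      · have hm : missing_region ((a, b, c) :: t) = true := by
          simp [missing_region, pvMissingAux_eq_gaps, hg]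
        have h1 : pvGaps b (pvFillFirst b t) ≤ f := by
          rw [pvGaps_fillFirst t b hg]; omega
        simp [pvWhileFill, hm, ih a b c _ h1, pvFillAll_fillFirst]

theorem pvGaps_le_length (t : List (Int × Int × Int)) : ∀ lend, pvGaps lend t ≤ t.length := by
  induction t with
  | nil => intro lend; simp [pvGaps]
  | cons h t ih =>
      intro lend
      obtain ⟨s, e, x⟩ := h
      simp only [pvGaps, List.length_cons]
      split_ifs <;> have := ih e <;> omega

-- ===== VERDICT (by name: the statement is the Claim_ definition above) =====
theorem clean_up_list_spec : Claim_equal_clean_up_list := by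
  intro l _ hpre
  unfold Spec_clean_up_list clean_up_list clean_up_list_alt
  match l with
  | [] => exact absurd rfl hpre
  | (s, e, x) :: t =>
      by_cases hs : s ≠ 0
      · show pvWhileFill (if s ≠ 0 then (0, s, 0) :: (s, e, x) :: t else (s, e, x) :: t).length
            (if s ≠ 0 then (0, s, 0) :: (s, e, x) :: t else (s, e, x) :: t) = _
        rw [if_pos hs]
        have hfuel : pvGaps s ((s, e, x) :: t) ≤ ((0, s, 0) :: (s, e, x) :: t).length := by
          have := pvGaps_le_length ((s, e, x) :: t) s
          simp at this ⊢; omega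
        rw [pvWhileFill_eq_fillAll _ 0 s 0 _ hfuel]
        simp [pvFillAll, hs]
      · push_neg at hs
        subst hs
        show pvWhileFill (if (0:Int) ≠ 0 then (0, 0, 0) :: (0, e, x) :: t else (0, e, x) :: t).length
            (if (0:Int) ≠ 0 then (0, 0, 0) :: (0, e, x) :: t else (0, e, x) :: t) = _
        rw [if_neg (by simp)]
        have hfuel : pvGaps e t ≤ ((0, e, x) :: t).length := by
          have := pvGaps_le_length t e
          simp; omega
        rw [pvWhileFill_eq_fillAll _ 0 e x t hfuel]
        simp [pvFillAll]
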